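-- pv_equiv track=rewrite | github.com/CoEDL/kaldi_helpers | scripts/make_wordlist.py | extract_wordlist
-- ===== SOURCE A (Python) =====
-- def extract_wordlist(data):
--     # Given the data object produce a list of strings of single words
--     # Returned list is of unique words and sorted
--     result = []
--     for utt in data:
--         words = utt.get('transcript').split()
--         result.extend(words)
--     result = list(set(result))
--     result.sort()
--     return result
-- ===== SOURCE B (Python) =====
-- def _push(out, w):
--     # append w unless it equals the last element already in out
--     if not out or out[-1] != w:
--         out.append(w)
--
--
-- def _merge(xs, ys):
--     # xs: sorted (may contain duplicates); ys: strictly increasing.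
--     # Returns the strictly increasing merge of the two (union of members).
--     out = []
--     i = j = 0
--     while i < len(xs) and j < len(ys):
--         if xs[i] < ys[j]:
--             w = xs[i]; i += 1
--         elif ys[j] < xs[i]:
--             w = ys[j]; j += 1
--         else:
--             w = xs[i]; i += 1; j += 1
--         _push(out, w)
--     while i < len(xs):
--         _push(out, xs[i]); i += 1
--     out.extend(ys[j:])
--     return out
--
--
-- def extract_wordlist(data):
--     # Merge each utterance's sorted word list into a running sorted
--     # unique list -- no set, no global sort.
--     result = []
--     for utt in data:
--         result = _merge(sorted(utt.get('transcript').split()), result)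
--     return result
-- ===== Notes on version B (the rewrite author's own statement) =====
-- stated objective: alternative
-- what changed: Replaces A's collect-all/hash-set/global-sort pipeline by an incremental algorithm: each utterance's word list is sorted on its own and two-pointer merged (with adjacent-duplicate suppression) into a running sorted unique accumulator, so no set and no global sort exist.
import Mathlib
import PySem

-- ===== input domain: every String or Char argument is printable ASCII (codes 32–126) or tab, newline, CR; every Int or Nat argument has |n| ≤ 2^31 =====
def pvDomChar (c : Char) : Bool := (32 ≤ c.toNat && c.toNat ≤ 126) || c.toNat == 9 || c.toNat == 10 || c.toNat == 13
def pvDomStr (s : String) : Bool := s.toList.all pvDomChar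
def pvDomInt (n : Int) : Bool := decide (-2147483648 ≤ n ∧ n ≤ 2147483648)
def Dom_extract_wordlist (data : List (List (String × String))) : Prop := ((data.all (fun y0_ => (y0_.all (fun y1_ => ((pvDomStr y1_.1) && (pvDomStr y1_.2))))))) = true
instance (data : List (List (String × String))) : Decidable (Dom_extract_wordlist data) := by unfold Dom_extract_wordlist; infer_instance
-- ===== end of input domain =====

-- B merges each utterance's individually sorted word list into a running
-- sorted unique accumulator by a two-pointer merge with adjacent-duplicate
-- suppression; no set and no global sort (alternative decomposition, same cost class).

-- ===== PORT A =====
def extract_wordlist (data : List (List (String × String))) : List String :=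
  -- result = []; for utt in data: result.extend(utt.get('transcript').split())
  -- (Pre_ guarantees the key is present, so the .getD "" default is never used)
  let result := data.foldl
    (fun acc utt => acc ++ PySem.Str.split₀ ((PySem.Dict.get? (PySem.Dict.mk utt) "transcript").getD "")) []
  -- result = list(set(result)); result.sort()
  PySem.List.sorted (PySem.Set.ofList result) (fun x => x) false

-- ===== PORT B =====
-- _push(out, w): append w unless it equals out's last element
def pvPush (out : List String) (w : String) : List String :=
  if out.isEmpty || PySem.List.pyGet? out (-1) != some w then out ++ [w] else out

-- _merge(xs, ys): the two index loops become structural recursion on the two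
-- unconsumed suffixes (the two pointers), with the same out accumulator
def pvMerge : List String → List String → List String → List String
  | out, x :: xs, y :: ys =>
    if x < y then pvMerge (pvPush out x) xs (y :: ys)
    else if y < x then pvMerge (pvPush out y) (x :: xs) ys
    else pvMerge (pvPush out x) xs ys
  | out, x :: xs, [] => pvMerge (pvPush out x) xs []
  | out, [], ys => out ++ ys
termination_by _ xs ys => xs.length + ys.length

def extract_wordlist_alt (data : List (List (String × String))) : List String :=
  -- result = []; for utt in data: result = _merge(sorted(words), result)
  data.foldl
    (fun result utt =>
      pvMerge []
        (PySem.List.sorted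
          (PySem.Str.split₀ ((PySem.Dict.get? (PySem.Dict.mk utt) "transcript").getD "")) (fun x => x) false)
        result)
    []

-- ===== PRECONDITION & SPEC =====
-- Pre_ excludes exactly the inputs on which Python A raises: a dict with no
-- 'transcript' key makes utt.get('transcript') return None and .split() raise
-- AttributeError (B raises there too).
def Pre_extract_wordlist (data : List (List (String × String))) : Prop :=
  (data.all (fun utt => (PySem.Dict.get? (PySem.Dict.mk utt) "transcript").isSome)) = true
instance (data : List (List (String × String))) : Decidable (Pre_extract_wordlist data) := by
  unfold Pre_extract_wordlist; infer_instance

def pvWitness_extract_wordlist : (List (List (String × String))) :=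
  [[("transcript", "b a b")], [("transcript", "a c")]]

def Spec_extract_wordlist (data : List (List (String × String))) (out : List String) : Prop := out = extract_wordlist_alt data
instance (data : List (List (String × String))) (out : List String) : Decidable (Spec_extract_wordlist data out) := by unfold Spec_extract_wordlist; infer_instance

-- ===== CLAIM (what is proved, stated in full; the proofs are below) =====
def Claim_equal_extract_wordlist : Prop := ∀ (data : List (List (String × String))), Dom_extract_wordlist data → Pre_extract_wordlist data → Spec_extract_wordlist data (extract_wordlist data)

-- ===== LEMMAS AND PROOFS =====

-- in a strictly increasing list the last element is maximal
lemma le_getLast_of_pairwise_lt : ∀ (l : List String), l.Pairwise (· < ·) →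
    ∀ a ∈ l, ∀ b, l.getLast? = some b → a ≤ b := by
  intro l
  induction l with
  | nil => intro _ a ha; cases ha
  | cons x t ih =>
    intro hl a ha b hb
    rw [List.pairwise_cons] at hl
    cases t with
    | nil =>
      simp at hb ha; simp [ha, hb]
    | cons y u =>
      rw [List.getLast?_cons_cons] at hb
      rcases List.mem_cons.mp ha with rfl | ha
      · exact le_of_lt (lt_of_lt_of_le (hl.1 y (by simp))
          (ih hl.2 y (by simp) b hb))
      · exact ih hl.2 a ha b hb

-- pvPush keeps the accumulator strictly increasing and adds w's membership,
-- provided w bounds the accumulator from above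
lemma pvPush_spec (out : List String) (w : String)
    (hout : out.Pairwise (· < ·)) (hle : ∀ a ∈ out, a ≤ w) :
    (pvPush out w).Pairwise (· < ·) ∧
    (∀ z, z ∈ pvPush out w ↔ z ∈ out ∨ z = w) ∧
    (∀ a ∈ pvPush out w, a ≤ w) := by
  unfold pvPush
  by_cases hc : (out.isEmpty || PySem.List.pyGet? out (-1) != some w) = true
  · rw [if_pos hc]
    have hlt : ∀ a ∈ out, a < w := by
      intro a ha
      rcases lt_or_eq_of_le (hle a ha) with h | rfl
      · exact h
      · exfalso
        have hne : out ≠ [] := by intro h; simp [h] at ha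
        obtain ⟨b, hb⟩ := List.getLast?_isSome.mpr hne |> Option.isSome_iff_exists.mp
        have hab : a ≤ b := le_getLast_of_pairwise_lt out hout a ha b hb
        have hba : b ≤ a := hle b (List.mem_of_getLast? hb)
        have : b = a := le_antisymm hba hab
        subst this
        simp [List.isEmpty_iff, hne, PySem.List.pyGet?_neg_one, hb] at hc
    refine ⟨?_, fun z => by simp, fun a ha => ?_⟩
    · rw [List.pairwise_append]
      exact ⟨hout, by simp, by simpa using hlt⟩
    · rcases List.mem_append.mp ha with h | h
      · exact hle a h
      · simp at h; simp [h]
  · rw [if_neg hc]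
    -- last of out is w, so w ∈ out already
    simp only [Bool.or_eq_true, not_or, Bool.not_eq_true] at hc
    have hne : out ≠ [] := by intro h; subst h; simp at hc
    have hw : w ∈ out := by
      have := hc.2
      simp only [bne, Bool.not_eq_false', beq_iff_eq] at this
      rw [PySem.List.pyGet?_neg_one] at this
      exact List.mem_of_getLast? this
    exact ⟨hout, fun z => ⟨Or.inl, fun h => h.elim id (fun e => e ▸ hw)⟩, hle⟩

-- the two-pointer merge: strictly increasing output, members = out ∪ xs ∪ ys
lemma pvMerge_spec : ∀ (out xs ys : List String),
    xs.Pairwise (· ≤ ·) → ys.Pairwise (· < ·) → out.Pairwise (· < ·) →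
    (∀ a ∈ out, ∀ x ∈ xs, a ≤ x) → (∀ a ∈ out, ∀ y ∈ ys, a < y) →
    (pvMerge out xs ys).Pairwise (· < ·) ∧
    (∀ z, z ∈ pvMerge out xs ys ↔ z ∈ out ∨ z ∈ xs ∨ z ∈ ys) := by
  intro out xs ys
  induction out, xs, ys using pvMerge.induct with
  | case1 out x xs y ys h1 ih =>
    intro hxs hys hout hlex hlty
    rw [List.pairwise_cons] at hxs hys
    rw [pvMerge, if_pos h1]
    obtain ⟨p1, p2, p3⟩ := pvPush_spec out x hout (fun a ha => hlex a ha x (by simp))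
    have hlex' : ∀ a ∈ pvPush out x, ∀ x' ∈ xs, a ≤ x' := by
      intro a ha x' hx'
      rcases (p2 a).mp ha with h | rfl
      · exact hlex a h x' (by simp [hx'])
      · exact hxs.1 x' hx'
    have hlty' : ∀ a ∈ pvPush out x, ∀ y' ∈ y :: ys, a < y' := by
      intro a ha y' hy'
      have hay : a ≤ x := p3 a ha
      rcases List.mem_cons.mp hy' with rfl | hy'
      · exact lt_of_le_of_lt hay h1
      · exact lt_of_le_of_lt hay (lt_trans h1 (hys.1 y' hy'))
    obtain ⟨q1, q2⟩ := ih hxs.2 (List.pairwise_cons.mpr hys) p1 hlex' hlty'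
    refine ⟨q1, fun z => ?_⟩
    rw [q2, p2]; simp; tauto
  | case2 out x xs y ys h1 h2 ih =>
    intro hxs hys hout hlex hlty
    rw [List.pairwise_cons] at hxs hys
    rw [pvMerge, if_neg h1, if_pos h2]
    obtain ⟨p1, p2, p3⟩ := pvPush_spec out y hout (fun a ha => le_of_lt (hlty a ha y (by simp)))
    have hlex' : ∀ a ∈ pvPush out y, ∀ x' ∈ x :: xs, a ≤ x' := by
      intro a ha x' hx'
      have hay : a ≤ y := p3 a ha
      rcases List.mem_cons.mp hx' with rfl | hx'
      · exact le_of_lt (lt_of_le_of_lt hay h2)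
      · exact le_trans (le_of_lt (lt_of_le_of_lt hay h2)) (hxs.1 x' hx')
    have hlty' : ∀ a ∈ pvPush out y, ∀ y' ∈ ys, a < y' := by
      intro a ha y' hy'
      exact lt_of_le_of_lt (p3 a ha) (hys.1 y' hy')
    obtain ⟨q1, q2⟩ := ih (List.pairwise_cons.mpr hxs) hys.2 p1 hlex' hlty'
    refine ⟨q1, fun z => ?_⟩
    rw [q2, p2]; simp; tauto
  | case3 out x xs y ys h1 h2 ih =>
    intro hxs hys hout hlex hlty
    rw [List.pairwise_cons] at hxs hys
    rw [pvMerge, if_neg h1, if_neg h2]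
    have hxy : x = y := le_antisymm (not_lt.mp h2) (not_lt.mp h1)
    subst hxy
    obtain ⟨p1, p2, p3⟩ := pvPush_spec out x hout (fun a ha => hlex a ha x (by simp))
    have hlex' : ∀ a ∈ pvPush out x, ∀ x' ∈ xs, a ≤ x' := by
      intro a ha x' hx'
      rcases (p2 a).mp ha with h | rfl
      · exact hlex a h x' (by simp [hx'])
      · exact hxs.1 x' hx'
    have hlty' : ∀ a ∈ pvPush out x, ∀ y' ∈ ys, a < y' := by
      intro a ha y' hy'
      exact lt_of_le_of_lt (p3 a ha) (hys.1 y' hy')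
    obtain ⟨q1, q2⟩ := ih hxs.2 hys.2 p1 hlex' hlty'
    refine ⟨q1, fun z => ?_⟩
    rw [q2, p2]; simp; tauto
  | case4 out x xs ih =>
    intro hxs _ hout hlex _
    rw [List.pairwise_cons] at hxs
    rw [pvMerge]
    obtain ⟨p1, p2, p3⟩ := pvPush_spec out x hout (fun a ha => hlex a ha x (by simp))
    have hlex' : ∀ a ∈ pvPush out x, ∀ x' ∈ xs, a ≤ x' := by
      intro a ha x' hx'
      rcases (p2 a).mp ha with h | rfl
      · exact hlex a h x' (by simp [hx'])
      · exact hxs.1 x' hx'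
    obtain ⟨q1, q2⟩ := ih hxs.2 (by simp) p1 hlex' (by simp)
    refine ⟨q1, fun z => ?_⟩
    rw [q2, p2]; simp; tauto
  | case5 out ys =>
    intro _ hys hout _ hlty
    rw [pvMerge]
    refine ⟨?_, fun z => by simp⟩
    rw [List.pairwise_append]
    exact ⟨hout, hys, fun a ha b hb => hlty a ha b hb⟩

-- B's fold over the utterances: the accumulator is strictly increasing and
-- holds exactly the words of the processed prefix together with its start value
lemma fold_inv : ∀ (data : List (List (String × String))) (res : List String),
    res.Pairwise (· < ·) →
    ((data.foldl
        (fun result utt =>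
          pvMerge []
            (PySem.List.sorted
              (PySem.Str.split₀ ((PySem.Dict.get? (PySem.Dict.mk utt) "transcript").getD "")) (fun x => x) false)
            result)
        res).Pairwise (· < ·)) ∧
    (∀ z, z ∈ data.foldl
        (fun result utt =>
          pvMerge []
            (PySem.List.sorted
              (PySem.Str.split₀ ((PySem.Dict.get? (PySem.Dict.mk utt) "transcript").getD "")) (fun x => x) false)
            result)
        res ↔ z ∈ res ∨ ∃ utt ∈ data,
          z ∈ PySem.Str.split₀ ((PySem.Dict.get? (PySem.Dict.mk utt) "transcript").getD "")) := by
  intro data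
  induction data with
  | nil => intro res h; simpa using h
  | cons utt data ih =>
    intro res hres
    simp only [List.foldl_cons]
    set ws := PySem.Str.split₀ ((PySem.Dict.get? (PySem.Dict.mk utt) "transcript").getD "") with hws
    have hsorted : (PySem.List.sorted ws (fun x => x) false).Pairwise (· ≤ ·) := by
      simpa using PySem.List.sorted_pairwise ws (fun x => x)
    obtain ⟨m1, m2⟩ := pvMerge_spec [] (PySem.List.sorted ws (fun x => x) false) res
      hsorted hres (by simp) (by simp) (by simp)
    obtain ⟨q1, q2⟩ := ih _ m1
    refine ⟨q1, fun z => ?_⟩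
    rw [q2, m2 z]
    simp [PySem.List.mem_sorted]
    tauto

-- ===== VERDICT (by name: the statement is the Claim_ definition above) =====
theorem extract_wordlist_spec : Claim_equal_extract_wordlist := by
  intro data _ _
  unfold Spec_extract_wordlist extract_wordlist extract_wordlist_alt
  obtain ⟨h1, h2⟩ := fold_inv data [] (by simp)
  apply PySem.List.sorted_eq_of_perm_of_pairwise_lt
  · rw [List.perm_ext_iff_of_nodup (h1.imp ne_of_lt) (PySem.Set.nodup_ofList _)]
    intro a
    rw [h2 a, PySem.Set.mem_ofList, PySem.List.foldl_append_eq_flatMap]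
    simp
  · simpa using h1
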